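-- pv_equiv track=rewrite | github.com/seoultech-EC-TCP-NL-hackathon/Team10-Decimal | apps/ai/pipeline/stages/merge.py | _segments_to_lines
-- ===== SOURCE A (Python) =====
-- from typing import Any, Dict, Iterable, List, Sequence
--
-- def _segments_to_lines(segments: Sequence[Dict[str, Any]]) -> List[str]:
--     """Convert merged segments into `SPEAKER: text` lines."""
--     lines: List[str] = []
--     for segment in segments:
--         text = (segment.get("text") or "").strip()
--         if not text:
--             continue
--         speaker = segment.get("speaker") or "UNKNOWN"
--         line = f"{speaker}: {text}"
--         if lines and lines[-1] == line:
--             continue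
--         lines.append(line)
--     return lines
-- ===== SOURCE B (Python) =====
-- from typing import Any, Dict, List, Sequence
--
-- def _segments_to_lines(segments: Sequence[Dict[str, Any]]) -> List[str]:
--     """Convert merged segments into `SPEAKER: text` lines."""
--     formatted = [
--         f"{segment.get('speaker') or 'UNKNOWN'}: {text}"
--         for segment in segments
--         for text in [(segment.get("text") or "").strip()]
--         if text
--     ]
--     return [line for prev, line in zip([None] + formatted, formatted) if line != prev]
-- ===== Notes on version B (the rewrite author's own statement) =====
-- stated objective: alternative
-- what changed: B separates the work into two passes: a comprehension builds the formatted lines (filter + format), then consecutive duplicates are removed by zipping each line with its predecessor, instead of A's single loop that checks lines[-1] while appending.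
import Mathlib
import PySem

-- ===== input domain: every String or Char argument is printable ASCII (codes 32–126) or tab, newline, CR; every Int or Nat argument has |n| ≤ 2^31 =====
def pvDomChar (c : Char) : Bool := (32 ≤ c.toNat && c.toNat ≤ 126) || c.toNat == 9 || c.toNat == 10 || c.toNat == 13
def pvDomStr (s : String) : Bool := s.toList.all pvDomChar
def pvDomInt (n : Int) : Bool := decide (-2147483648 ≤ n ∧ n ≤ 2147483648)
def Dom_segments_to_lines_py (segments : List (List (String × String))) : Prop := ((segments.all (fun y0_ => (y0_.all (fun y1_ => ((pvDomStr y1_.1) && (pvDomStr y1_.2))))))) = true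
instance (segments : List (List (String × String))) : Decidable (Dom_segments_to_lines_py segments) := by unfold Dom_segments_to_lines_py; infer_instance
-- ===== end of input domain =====

-- B builds the formatted lines in one pass and then drops each line equal to its
-- predecessor in a second zip-with-predecessor pass, instead of A's single loop
-- with a lines[-1] check (same O(n) cost; objective: alternative decomposition).

-- ===== PORT A =====
def segments_to_lines_py (segments : List (List (String × String))) : List String :=
  segments.foldl (fun lines segment =>
    -- text = (segment.get("text") or "").strip()  ('or ""' maps none/"" to "")
    let text := PySem.Str.strip (((PySem.Dict.mk segment).get? "text").getD "")
    if text = "" then lines          -- if not text: continue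
    else
      -- speaker = segment.get("speaker") or "UNKNOWN"  (none or "" → "UNKNOWN")
      let speaker := match (PySem.Dict.mk segment).get? "speaker" with
        | some s => if s = "" then "UNKNOWN" else s
        | none => "UNKNOWN"
      let line := speaker ++ ": " ++ text
      if lines.getLast? = some line then lines   -- if lines and lines[-1] == line: continue
      else lines ++ [line]) []

-- ===== PORT B =====
-- B-side helper: the body of B's comprehension (format one segment, none if text falsy)
def pvFmtSeg (segment : List (String × String)) : Option String :=
  let text := PySem.Str.strip (((PySem.Dict.mk segment).get? "text").getD "")
  if text = "" then none
  else some ((match (PySem.Dict.mk segment).get? "speaker" with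
    | some s => if s = "" then "UNKNOWN" else s
    | none => "UNKNOWN") ++ ": " ++ text)

def segments_to_lines_py_alt (segments : List (List (String × String))) : List String :=
  let formatted := segments.filterMap pvFmtSeg
  -- [line for prev, line in zip([None] + formatted, formatted) if line != prev]
  (((none : Option String) :: formatted.map some).zip formatted).filterMap
    (fun pl => if some pl.2 = pl.1 then none else some pl.2)

-- ===== PRECONDITION & SPEC =====
def Spec_segments_to_lines_py (segments : List (List (String × String))) (out : List String) : Prop := out = segments_to_lines_py_alt segments
instance (segments : List (List (String × String))) (out : List String) : Decidable (Spec_segments_to_lines_py segments out) := by unfold Spec_segments_to_lines_py; infer_instance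

-- ===== CLAIM (what is proved, stated in full; the proofs are below) =====
def Claim_equal_segments_to_lines_py : Prop := ∀ (segments : List (List (String × String))), Dom_segments_to_lines_py segments → Spec_segments_to_lines_py segments (segments_to_lines_py segments)

-- ===== LEMMAS AND PROOFS =====

-- proof-only helper: collapse consecutive duplicates, carrying the previous line
def pvColB (prev : Option String) : List String → List String
  | [] => []
  | y :: t => if some y = prev then pvColB (some y) t else y :: pvColB (some y) t

-- B's zip-with-predecessor pass computes pvColB
theorem pvZipEqColB (l : List String) (prev : Option String) :
    ((prev :: l.map some).zip l).filterMap
      (fun pl => if some pl.2 = pl.1 then none else some pl.2) = pvColB prev l := by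
  induction l generalizing prev with
  | nil => rfl
  | cons y t ih =>
      simp only [List.map, List.zip_cons_cons, List.filterMap_cons, pvColB]
      split_ifs <;> simp [ih]

-- A's loop body, named, in terms of pvFmtSeg
theorem pvStepA (lines : List String) (segment : List (String × String)) :
    (let text := PySem.Str.strip (((PySem.Dict.mk segment).get? "text").getD "")
     if text = "" then lines
     else
       let speaker := match (PySem.Dict.mk segment).get? "speaker" with
         | some s => if s = "" then "UNKNOWN" else s
         | none => "UNKNOWN"
       let line := speaker ++ ": " ++ text
       if lines.getLast? = some line then lines
       else lines ++ [line]) =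
    (match pvFmtSeg segment with
    | none => lines
    | some line => if lines.getLast? = some line then lines else lines ++ [line]) := by
  simp only [pvFmtSeg]
  split_ifs <;> simp [*]

-- A's fold equals acc ++ collapse of the formatted tail
theorem pvFoldEq (segs : List (List (String × String))) (acc : List String) :
    segs.foldl (fun lines segment =>
      let text := PySem.Str.strip (((PySem.Dict.mk segment).get? "text").getD "")
      if text = "" then lines
      else
        let speaker := match (PySem.Dict.mk segment).get? "speaker" with
          | some s => if s = "" then "UNKNOWN" else s
          | none => "UNKNOWN"
        let line := speaker ++ ": " ++ text
        if lines.getLast? = some line then lines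
        else lines ++ [line]) acc
    = acc ++ pvColB acc.getLast? (segs.filterMap pvFmtSeg) := by
  induction segs generalizing acc with
  | nil => simp [pvColB]
  | cons seg t ih =>
      rw [List.foldl_cons, pvStepA, List.filterMap_cons]
      cases h : pvFmtSeg seg with
      | none => simp [ih]
      | some line =>
          simp only [pvColB]
          by_cases hl : acc.getLast? = some line
          · rw [if_pos hl, ih, hl, if_pos rfl]
          · rw [if_neg hl, ih]
            have hlast : (acc ++ [line]).getLast? = some line := by
              simp [List.getLast?_append]
            rw [hlast, if_neg (by simpa using fun h' => hl h'.symm)]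
            simp

-- ===== VERDICT (by name: the statement is the Claim_ definition above) =====
theorem segments_to_lines_py_spec : Claim_equal_segments_to_lines_py := by
  intro segments _
  unfold Spec_segments_to_lines_py segments_to_lines_py segments_to_lines_py_alt
  rw [pvFoldEq, pvZipEqColB]
  rfl
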